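-- pv_equiv track=rewrite | github.com/millotp/adventofcode2023 | python/day13.py | rev_sym
-- ===== SOURCE A (Python) =====
-- def rev_sym(p):
--   for i in range(len(p)-2,-1,-1):
--     if p[i] == p[i+1]:
--       has_sy = True
--       # expand
--       for j in range(len(p)):
--         if i-j<0 or i+1+j>=len(p):
--           break
--         if not p[i-j] == p[i+1+j]:
--           has_sy = False
--       if has_sy:
--         return i+1
--   return 0
-- ===== SOURCE B (Python) =====
-- def rev_sym(p):
--   n = len(p)
--   row = [True] * (n + 1)          # even-palindrome windows of length 0 at each start
--   best = 0
--   for k in range(1, n // 2 + 1):  # window length L = 2*k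
--     L = 2 * k
--     row = [p[i] == p[i + L - 1] and row[i + 1] for i in range(n - L + 1)]
--     if row[0]:
--       best = max(best, k)        # palindromic prefix of length 2k -> axis k
--     if row[n - L]:
--       best = max(best, n - k)    # palindromic suffix of length 2k -> axis n-k
--   return best
-- ===== Notes on version B (the rewrite author's own statement) =====
-- stated objective: alternative
-- what changed: A expands symmetry around each candidate axis scanned from the top; B instead builds a dynamic-programming row of even-length palindromic windows (length 2k from the row for 2k-2), collects the axes of boundary-touching palindromic windows (prefix -> axis k, suffix -> axis n-k) and returns their maximum.
import Mathlib
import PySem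

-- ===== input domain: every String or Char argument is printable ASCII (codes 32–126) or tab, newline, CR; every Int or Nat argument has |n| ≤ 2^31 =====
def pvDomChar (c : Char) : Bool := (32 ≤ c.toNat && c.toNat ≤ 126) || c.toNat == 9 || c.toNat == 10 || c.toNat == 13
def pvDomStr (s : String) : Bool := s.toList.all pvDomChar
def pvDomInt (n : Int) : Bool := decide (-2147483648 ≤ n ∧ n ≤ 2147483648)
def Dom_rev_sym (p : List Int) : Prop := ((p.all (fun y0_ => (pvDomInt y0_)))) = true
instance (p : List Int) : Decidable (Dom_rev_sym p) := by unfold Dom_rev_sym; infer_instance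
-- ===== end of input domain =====

-- B replaces A's per-axis symmetry expansion by a DP over even-length palindromic
-- windows, collecting axes of boundary-touching windows and taking their maximum;
-- objective: alternative (same cost, different algorithm).

-- ===== PORT A =====
-- inner 'for j in range(len(p))' loop with the break and the has_sy flag
def pvInnerA (p : List Int) (i : Int) : List Int → Bool → Bool
  | [], has_sy => has_sy
  | j :: js, has_sy =>
    if i - j < 0 ∨ (p.length : Int) ≤ i + 1 + j then has_sy   -- break
    else pvInnerA p i js
      (if ¬ (PySem.List.pyGetD p (i - j) 0 = PySem.List.pyGetD p (i + 1 + j) 0) then false else has_sy)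

-- outer 'for i in range(len(p)-2,-1,-1)' loop with the early returns
def pvOuterA (p : List Int) : List Int → Int
  | [] => 0
  | i :: is =>
    if PySem.List.pyGetD p i 0 = PySem.List.pyGetD p (i + 1) 0 then
      if pvInnerA p i (PySem.List.pyRange 0 (p.length : Int) 1) true then i + 1
      else pvOuterA p is
    else pvOuterA p is

def rev_sym (p : List Int) : Int :=
  pvOuterA p (PySem.List.pyRange ((p.length : Int) - 2) (-1) (-1))

-- ===== PORT B =====
-- 'row = [p[i] == p[i+L-1] and row[i+1] for i in range(n-L+1)]' with L = 2*k
def pvStepB (p : List Int) (k : Int) (row : List Bool) : List Bool :=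
  (PySem.List.pyRange 0 ((p.length : Int) - 2 * k + 1) 1).map
    (fun i => (PySem.List.pyGetD p i 0 == PySem.List.pyGetD p (i + 2 * k - 1) 0)
      && PySem.List.pyGetD row (i + 1) false)

-- 'for k in range(1, n//2+1): row = …; if row[0]: …; if row[n-L]: …'
def pvLoopB (p : List Int) : List Int → List Bool → Int → Int
  | [], _, best => best
  | k :: ks, row, best =>
    let row' := pvStepB p k row
    let b1 := if PySem.List.pyGetD row' 0 false = true then max best k else best
    let b2 := if PySem.List.pyGetD row' ((p.length : Int) - 2 * k) false = true
              then max b1 ((p.length : Int) - k) else b1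
    pvLoopB p ks row' b2

def rev_sym_alt (p : List Int) : Int :=
  pvLoopB p (PySem.List.pyRange 1 (PySem.Int.floordiv (p.length : Int) 2 + 1) 1)
    (List.replicate (p.length + 1) true) 0

-- ===== PRECONDITION & SPEC =====
def Spec_rev_sym (p : List Int) (out : Int) : Prop := out = rev_sym_alt p
instance (p : List Int) (out : Int) : Decidable (Spec_rev_sym p out) := by unfold Spec_rev_sym; infer_instance

-- ===== CLAIM =====
def Claim_equal_rev_sym : Prop := ∀ (p : List Int), Dom_rev_sym p → Spec_rev_sym p (rev_sym p)

-- ===== LEMMAS AND PROOFS =====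

-- window p[i:i+L] is a palindrome (index form)
abbrev PalIdx (p : List Int) (i L : Nat) : Prop :=
  ∀ t, t < L → p.getD (i + t) 0 = p.getD (i + L - 1 - t) 0

-- axis m (1 ≤ m ≤ n-1) is a reflection axis
abbrev ReflA (p : List Int) (m : Nat) : Prop :=
  1 ≤ m ∧ m + 1 ≤ p.length ∧
    ∀ t, t < min m (p.length - m) → p.getD (m - 1 - t) 0 = p.getD (m + t) 0

-- the largest reflection axis ≤ c, else 0 (reference value)
def bestUpTo (p : List Int) : Nat → Int
  | 0 => 0
  | c + 1 => if ReflA p (c + 1) then ((c : Int) + 1) else bestUpTo p c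

-- the DP row after processing window length L
def rowOf (p : List Int) (L : Nat) : List Bool :=
  (List.range (p.length - L + 1)).map (fun i => decide (PalIdx p i L))

lemma palIdx_succ (p : List Int) (i L : Nat) (hL : 2 ≤ L) :
    PalIdx p i L ↔ (p.getD i 0 = p.getD (i + L - 1) 0 ∧ PalIdx p (i + 1) (L - 2)) := by
  constructor
  · intro h
    refine ⟨?_, ?_⟩
    · have := h 0 (by omega)
      simpa using this
    · intro t ht
      have := h (t + 1) (by omega)
      have e1 : i + (t + 1) = i + 1 + t := by omega
      have e2 : i + L - 1 - (t + 1) = i + 1 + (L - 2) - 1 - t := by omega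
      rw [e1, e2] at this
      exact this
  · rintro ⟨h0, h2⟩ t ht
    by_cases ht0 : t = 0
    · subst ht0
      simpa using h0
    · by_cases htL : t = L - 1
      · subst htL
        have e1 : i + (L - 1) = i + L - 1 := by omega
        have e2 : i + L - 1 - (L - 1) = i := by omega
        rw [e1, e2]
        exact h0.symm
      · have h2' := h2 (t - 1) (by omega)
        have e1 : i + 1 + (t - 1) = i + t := by omega
        have e2 : i + 1 + (L - 2) - 1 - (t - 1) = i + L - 1 - t := by omega
        rw [e1, e2] at h2'
        exact h2'

lemma rowOf_zero (p : List Int) : rowOf p 0 = List.replicate (p.length + 1) true := by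
  unfold rowOf
  rw [List.eq_replicate_iff]
  constructor
  · simp
  · intro b hb
    rw [List.mem_map] at hb
    obtain ⟨i, _, rfl⟩ := hb
    simp only [decide_eq_true_eq]
    intro t ht
    omega

lemma stepB_rowOf (p : List Int) (k : Nat) (hk : 1 ≤ k) (hkn : 2 * k ≤ p.length) :
    pvStepB p (k : Int) (rowOf p (2 * k - 2)) = rowOf p (2 * k) := by
  unfold pvStepB rowOf
  have hb : ((p.length : Int) - 2 * (k : Int) + 1) = ((p.length - 2 * k + 1 : Nat) : Int) := by
    push_cast; omega
  rw [hb, PySem.List.pyRange_zero_nat, List.map_map]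
  apply List.map_congr_left
  intro j hj
  rw [List.mem_range] at hj
  simp only [Function.comp_apply]
  have e1 : ((j : Nat) : Int) + 2 * (k : Int) - 1 = ((j + 2 * k - 1 : Nat) : Int) := by
    omega
  rw [e1, PySem.List.pyGetD_natCast, PySem.List.pyGetD_natCast]
  have e2 : ((j : Nat) : Int) + 1 = ((j + 1 : Nat) : Int) := by omega
  rw [e2, PySem.List.pyGetD_natCast]
  have hlen : (List.range (p.length - (2 * k - 2) + 1)).length = p.length - (2 * k - 2) + 1 := by
    simp
  have hjlt : j + 1 < ((List.range (p.length - (2 * k - 2) + 1)).map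
      (fun i => decide (PalIdx p i (2 * k - 2)))).length := by
    simp; omega
  rw [List.getD_eq_getElem _ _ hjlt]
  rw [List.getElem_map, List.getElem_range]
  rw [Bool.eq_iff_iff]
  simp only [Bool.and_eq_true, beq_iff_eq, decide_eq_true_eq]
  exact (palIdx_succ p j (2 * k) (by omega)).symm

lemma prefix_refl (p : List Int) (k : Nat) (hk : 1 ≤ k) (hkn : 2 * k ≤ p.length) :
    PalIdx p 0 (2 * k) ↔ ReflA p k := by
  constructor
  · intro h
    refine ⟨hk, by omega, ?_⟩
    intro t ht
    have htk : t < k := by omega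
    have := h (k + t) (by omega)
    have e1 : 0 + (k + t) = k + t := by omega
    have e2 : 0 + 2 * k - 1 - (k + t) = k - 1 - t := by omega
    rw [e1, e2] at this
    exact this.symm
  · rintro ⟨_, _, h⟩ t ht
    by_cases htk : t < k
    · have := h (k - 1 - t) (by omega)
      have e1 : k - 1 - (k - 1 - t) = t := by omega
      have e2 : k + (k - 1 - t) = 0 + 2 * k - 1 - t := by omega
      rw [e1, e2] at this
      simpa using this
    · have := h (t - k) (by omega)
      have e1 : k - 1 - (t - k) = 0 + 2 * k - 1 - t := by omega
      have e2 : k + (t - k) = t := by omega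
      rw [e1, e2] at this
      simpa using this.symm

lemma suffix_refl (p : List Int) (k : Nat) (hk : 1 ≤ k) (hkn : 2 * k ≤ p.length) :
    PalIdx p (p.length - 2 * k) (2 * k) ↔ ReflA p (p.length - k) := by
  have hn : 2 * k ≤ p.length := hkn
  constructor
  · intro h
    refine ⟨by omega, by omega, ?_⟩
    intro t ht
    have htk : t < k := by omega
    have := h (k + t) (by omega)
    have e1 : p.length - 2 * k + (k + t) = p.length - k + t := by omega
    have e2 : p.length - 2 * k + 2 * k - 1 - (k + t) = p.length - k - 1 - t := by omega
    rw [e1, e2] at this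
    exact this.symm
  · rintro ⟨_, _, h⟩ t ht
    have hmin : min (p.length - k) (p.length - (p.length - k)) = k := by omega
    by_cases htk : t < k
    · have := h (k - 1 - t) (by rw [hmin]; omega)
      have e1 : p.length - k - 1 - (k - 1 - t) = p.length - 2 * k + t := by omega
      have e2 : p.length - k + (k - 1 - t) = p.length - 2 * k + 2 * k - 1 - t := by omega
      rw [e1, e2] at this
      exact this
    · have := h (t - k) (by rw [hmin]; omega)
      have e1 : p.length - k - 1 - (t - k) = p.length - 2 * k + 2 * k - 1 - t := by omega
      have e2 : p.length - k + (t - k) = p.length - 2 * k + t := by omega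
      rw [e1, e2] at this
      exact this.symm

lemma bestUpTo_nonneg (p : List Int) : ∀ c, 0 ≤ bestUpTo p c := by
  intro c
  induction c with
  | zero => simp [bestUpTo]
  | succ c ih =>
    unfold bestUpTo
    split_ifs with h
    · omega
    · exact ih

lemma bestUpTo_sound (p : List Int) :
    ∀ c, bestUpTo p c = 0 ∨ ∃ m, 1 ≤ m ∧ m ≤ c ∧ ReflA p m ∧ bestUpTo p c = (m : Int) := by
  intro c
  induction c with
  | zero => left; rfl
  | succ c ih =>
    unfold bestUpTo
    split_ifs with h
    · right; exact ⟨c + 1, by omega, by omega, h, by push_cast; ring⟩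
    · rcases ih with h0 | ⟨m, h1, h2, h3, h4⟩
      · left; exact h0
      · right; exact ⟨m, h1, by omega, h3, h4⟩

lemma bestUpTo_complete (p : List Int) :
    ∀ c m, 1 ≤ m → m ≤ c → ReflA p m → (m : Int) ≤ bestUpTo p c := by
  intro c
  induction c with
  | zero => intro m h1 h2 _; omega
  | succ c ih =>
    intro m h1 h2 hm
    unfold bestUpTo
    split_ifs with h
    · have : (m : Int) ≤ (c : Int) + 1 := by omega
      exact this
    · have hne : m ≠ c + 1 := by
        intro he; exact h (he ▸ hm)
      exact ih m h1 (by omega) hm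

-- ===== A side: rev_sym p = bestUpTo p (p.length - 1) =====

-- A's inner loop over in-range indices folds the flag through the pairwise tests
lemma innerA_append (p : List Int) (i : Int) :
    ∀ (js rest : List Int) (has : Bool),
      (∀ j ∈ js, 0 ≤ i - j ∧ i + 1 + j < (p.length : Int)) →
      pvInnerA p i (js ++ rest) has =
        pvInnerA p i rest
          (has && js.all (fun j =>
            decide (PySem.List.pyGetD p (i - j) 0 = PySem.List.pyGetD p (i + 1 + j) 0))) := by
  intro js
  induction js with
  | nil => intro rest has _; simp
  | cons j js ih =>
    intro rest has h
    have hj := h j (by simp)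
    have hnb : ¬ (i - j < 0 ∨ (p.length : Int) ≤ i + 1 + j) := by omega
    simp only [List.cons_append, pvInnerA, if_neg hnb]
    rw [ih rest _ (fun x hx => h x (by simp [hx]))]
    congr 1
    by_cases he : PySem.List.pyGetD p (i - j) 0 = PySem.List.pyGetD p (i + 1 + j) 0 <;>
      simp [he]

-- the loop-head condition of A at index i = c says exactly 'axis c+1 reflects'
lemma condA_iff_refl (p : List Int) (c : Nat) (h : c + 2 ≤ p.length) :
    ((PySem.List.pyGetD p (c : Int) 0 = PySem.List.pyGetD p ((c : Int) + 1) 0) ∧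
      pvInnerA p (c : Int) (PySem.List.pyRange 0 (p.length : Int) 1) true = true) ↔
    ReflA p (c + 1) := by
  set N := p.length with hNdef
  set k := min (c + 1) (N - (c + 1)) with hkdef
  have hAiff :
      ((PySem.List.pyRange 0 (k : Int) 1).all (fun j =>
        decide (PySem.List.pyGetD p ((c : Int) - j) 0 = PySem.List.pyGetD p ((c : Int) + 1 + j) 0))
        = true) ↔
      (∀ t : Nat, t < k → p.getD (c - t) 0 = p.getD (c + 1 + t) 0) := by
    rw [List.all_eq_true]
    constructor
    · intro hall t ht
      have := hall (t : Int) (by rw [PySem.List.mem_pyRange_one]; omega)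
      rw [show (c : Int) - (t : Int) = ((c - t : Nat) : Int) by omega,
        show (c : Int) + 1 + (t : Int) = ((c + 1 + t : Nat) : Int) by omega,
        PySem.List.pyGetD_natCast, PySem.List.pyGetD_natCast] at this
      exact of_decide_eq_true this
    · intro hP j hj
      rw [PySem.List.mem_pyRange_one] at hj
      rw [show (c : Int) - j = ((c - j.toNat : Nat) : Int) by omega,
        show (c : Int) + 1 + j = ((c + 1 + j.toNat : Nat) : Int) by omega,
        PySem.List.pyGetD_natCast, PySem.List.pyGetD_natCast]
      exact decide_eq_true (hP j.toNat (by omega))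
  have hsplit : PySem.List.pyRange 0 (N : Int) 1
      = PySem.List.pyRange 0 (k : Int) 1 ++ PySem.List.pyRange (k : Int) (N : Int) 1 :=
    PySem.List.pyRange_one_append 0 (k : Int) (N : Int) (by omega) (by omega)
  have hrest : PySem.List.pyRange (k : Int) (N : Int) 1
      = (k : Int) :: PySem.List.pyRange ((k : Int) + 1) (N : Int) 1 :=
    PySem.List.pyRange_one_cons (by omega)
  have hinner : pvInnerA p (c : Int) (PySem.List.pyRange 0 (N : Int) 1) true
      = ((PySem.List.pyRange 0 (k : Int) 1).all (fun j =>
          decide (PySem.List.pyGetD p ((c : Int) - j) 0 = PySem.List.pyGetD p ((c : Int) + 1 + j) 0))) := by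
    rw [hsplit, innerA_append p (c : Int) _ _ true (by
      intro j hj
      rw [PySem.List.mem_pyRange_one] at hj
      constructor <;> omega)]
    rw [hrest]
    show (if (c : Int) - (k : Int) < 0 ∨ (p.length : Int) ≤ (c : Int) + 1 + (k : Int) then _ else _) = _
    rw [if_pos (by omega)]
    simp
  rw [hinner, hAiff]
  constructor
  · rintro ⟨_, hP⟩
    refine ⟨by omega, by omega, ?_⟩
    intro t ht
    have := hP t (by omega)
    have e1 : c + 1 - 1 - t = c - t := by omega
    have e2 : c + 1 + t = c + 1 + t := rfl
    rw [e1]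
    exact this
  · rintro ⟨_, _, hP⟩
    have hP' : ∀ t : Nat, t < k → p.getD (c - t) 0 = p.getD (c + 1 + t) 0 := by
      intro t ht
      have := hP t (by omega)
      have e1 : c + 1 - 1 - t = c - t := by omega
      rw [e1] at this
      exact this
    refine ⟨?_, hP'⟩
    have h0 := hP' 0 (by omega)
    rw [show ((c : Int)) = ((c : Nat) : Int) by omega,
      show ((c : Nat) : Int) + 1 = ((c + 1 : Nat) : Int) by omega,
      PySem.List.pyGetD_natCast, PySem.List.pyGetD_natCast]
    simpa using h0

lemma outerA_eq_bestUpTo (p : List Int) :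
    ∀ (c : Nat), c ≤ p.length - 1 →
      pvOuterA p (PySem.List.pyRange ((c : Int) - 1) (-1) (-1)) = bestUpTo p c := by
  intro c
  induction c with
  | zero =>
    intro _
    rw [PySem.List.pyRange_neg_one_eq_nil (by norm_num)]
    rfl
  | succ c ih =>
    intro hc
    have hn : c + 2 ≤ p.length := by omega
    rw [show (((c + 1 : Nat) : Int) - 1) = (c : Int) by push_cast; ring]
    rw [PySem.List.pyRange_neg_one_cons (show (-1 : Int) < (c : Int) by omega)]
    simp only [pvOuterA]
    have hcond := condA_iff_refl p c hn
    unfold bestUpTo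
    have hrec := ih (by omega)
    split_ifs with h1 h2 h3 h3 h3
    · ring
    · exact absurd (hcond.mp ⟨h1, h2⟩) h3
    · exact absurd ((hcond.mpr h3).2) h2
    · exact hrec
    · exact absurd ((hcond.mpr h3).1) h1
    · exact hrec

lemma revsymA_eq (p : List Int) : rev_sym p = bestUpTo p (p.length - 1) := by
  unfold rev_sym
  cases hN : p.length with
  | zero =>
    rw [PySem.List.pyRange_neg_one_eq_nil (by norm_num)]
    rfl
  | succ n =>
    rw [show ((n + 1 : Nat) : Int) - 2 = ((n : Nat) : Int) - 1 by push_cast; ring]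
    have := outerA_eq_bestUpTo p n (by omega)
    simpa using this

-- ===== B side: rev_sym_alt p = bestUpTo p (p.length - 1) =====

-- a sound accumulator value: 0 or some reflection axis
abbrev SoundB (p : List Int) (b : Int) : Prop :=
  b = 0 ∨ ∃ m, 1 ≤ m ∧ m + 1 ≤ p.length ∧ ReflA p m ∧ b = (m : Int)

lemma sound_max (p : List Int) (b : Int) (m : Nat)
    (hb : SoundB p b) (h1 : 1 ≤ m) (h2 : m + 1 ≤ p.length) (hm : ReflA p m) :
    SoundB p (max b (m : Int)) := by
  rcases le_total b (m : Int) with h | h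
  · right; exact ⟨m, h1, h2, hm, by omega⟩
  · rcases hb with h0 | ⟨m', a1, a2, a3, a4⟩
    · right; exact ⟨m, h1, h2, hm, by omega⟩
    · right; exact ⟨m', a1, a2, a3, by omega⟩

lemma axis_case (n m a : Nat) (hma : ¬ min m (n - m) ≤ a) (hmin : min m (n - m) ≤ a + 1)
    (h2 : m + 1 ≤ n) :
    (m ≤ n - m → m = a + 1) ∧ (¬ m ≤ n - m → m = n - (a + 1)) := by omega

lemma loopB_invariant (p : List Int) :
    ∀ (b : Nat) (a : Nat) (best : Int), a + b = p.length / 2 →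
      SoundB p best → 0 ≤ best →
      (∀ m, 1 ≤ m → m + 1 ≤ p.length → ReflA p m → min m (p.length - m) ≤ a → (m : Int) ≤ best) →
      pvLoopB p (PySem.List.pyRange ((a : Int) + 1) (((p.length / 2 : Nat) : Int) + 1) 1)
        (rowOf p (2 * a)) best = bestUpTo p (p.length - 1) := by
  intro b
  induction b with
  | zero =>
    intro a best ha hs h0 hc
    rw [PySem.List.pyRange_one_eq_nil (by omega)]
    show best = _
    have hle1 : best ≤ bestUpTo p (p.length - 1) := by
      rcases hs with h | ⟨m, a1, a2, a3, a4⟩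
      · rw [h]; exact bestUpTo_nonneg p _
      · rw [a4]; exact bestUpTo_complete p _ m a1 (by omega) a3
    have hle2 : bestUpTo p (p.length - 1) ≤ best := by
      rcases bestUpTo_sound p (p.length - 1) with h | ⟨m, a1, a2, a3, a4⟩
      · rw [h]; exact h0
      · rw [a4]
        exact hc m a1 (by omega) a3 (by omega)
    omega
  | succ b ih =>
    intro a best ha hs h0 hc
    have halt : a < p.length / 2 := by omega
    have hk1 : 1 ≤ a + 1 := by omega
    have hkn : 2 * (a + 1) ≤ p.length := by omega
    rw [PySem.List.pyRange_one_cons (by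
      push_cast
      omega)]
    simp only [pvLoopB]
    have hstep : pvStepB p ((a : Int) + 1) (rowOf p (2 * a)) = rowOf p (2 * (a + 1)) := by
      have := stepB_rowOf p (a + 1) hk1 hkn
      rw [show (((a + 1 : Nat)) : Int) = (a : Int) + 1 by omega,
        show 2 * (a + 1) - 2 = 2 * a by omega] at this
      exact this
    rw [hstep]
    -- the two candidate reads
    have hlenrow : (rowOf p (2 * (a + 1))).length = p.length - 2 * (a + 1) + 1 := by
      unfold rowOf; simp
    have hget0 : PySem.List.pyGetD (rowOf p (2 * (a + 1))) 0 false
        = decide (PalIdx p 0 (2 * (a + 1))) := by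
      rw [PySem.List.pyGetD_zero]
      unfold rowOf
      rw [List.getD_eq_getElem _ _ (by simp), List.getElem_map, List.getElem_range]
    have hgetS : PySem.List.pyGetD (rowOf p (2 * (a + 1))) ((p.length : Int) - 2 * ((a : Int) + 1)) false
        = decide (PalIdx p (p.length - 2 * (a + 1)) (2 * (a + 1))) := by
      rw [show (p.length : Int) - 2 * ((a : Int) + 1) = ((p.length - 2 * (a + 1) : Nat) : Int) by
        omega, PySem.List.pyGetD_natCast]
      unfold rowOf
      rw [List.getD_eq_getElem _ _ (by rw [List.length_map, List.length_range]; omega),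
        List.getElem_map, List.getElem_range]
    have hA2 : (a + 1) + 1 ≤ p.length := by omega
    have hA2' : a + 1 ≤ p.length := by omega
    have hA3 : 1 ≤ p.length - (a + 1) := by omega
    have hA4 : (p.length - (a + 1)) + 1 ≤ p.length := by omega
    set b1 := if PySem.List.pyGetD (rowOf p (2 * (a + 1))) 0 false = true
        then max best ((a : Int) + 1) else best with hb1def
    set b2 := if PySem.List.pyGetD (rowOf p (2 * (a + 1))) ((p.length : Int) - 2 * ((a : Int) + 1)) false = true
        then max b1 ((p.length : Int) - ((a : Int) + 1)) else b1 with hb2def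
    have hbest_le_b1 : best ≤ b1 := by
      rw [hb1def]; split_ifs with h
      · exact le_max_left _ _
      · exact le_rfl
    have hb1_le_b2 : b1 ≤ b2 := by
      rw [hb2def]; split_ifs with h
      · exact le_max_left _ _
      · exact le_rfl
    have hs1 : SoundB p b1 := by
      rw [hb1def]; split_ifs with h
      · rw [hget0, decide_eq_true_eq] at h
        have hr := (prefix_refl p (a + 1) hk1 hkn).mp h
        have := sound_max p best (a + 1) hs hk1 hA2 hr
        rw [show (((a + 1 : Nat)) : Int) = (a : Int) + 1 by rw [Nat.cast_add, Nat.cast_one]] at this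
        exact this
      · exact hs
    have hs2 : SoundB p b2 := by
      rw [hb2def]; split_ifs with h
      · rw [hgetS, decide_eq_true_eq] at h
        have hr := (suffix_refl p (a + 1) hk1 hkn).mp h
        have := sound_max p b1 (p.length - (a + 1)) hs1 hA3 hA4 hr
        rw [show ((p.length - (a + 1) : Nat) : Int) = (p.length : Int) - ((a : Int) + 1) by
          rw [Nat.cast_sub hA2', Nat.cast_add, Nat.cast_one]] at this
        exact this
      · exact hs1
    have hc2 : ∀ m, 1 ≤ m → m + 1 ≤ p.length → ReflA p m →
        min m (p.length - m) ≤ a + 1 → (m : Int) ≤ b2 := by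
      intro m h1 h2 hm hmin
      by_cases hma : min m (p.length - m) ≤ a
      · calc (m : Int) ≤ best := hc m h1 h2 hm hma
          _ ≤ b1 := hbest_le_b1
          _ ≤ b2 := hb1_le_b2
      · have hcase := axis_case p.length m a hma hmin h2
        by_cases hside : m ≤ p.length - m
        · -- prefix candidate: m = a + 1
          have hmeq : m = a + 1 := hcase.1 hside
          have hpal : PalIdx p 0 (2 * (a + 1)) :=
            (prefix_refl p (a + 1) hk1 hkn).mpr (hmeq ▸ hm)
          have hb1v : b1 = max best ((a : Int) + 1) := by
            rw [hb1def, if_pos (by rw [hget0]; exact decide_eq_true hpal)]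
          have hle1 : (m : Int) ≤ b1 := by
            rw [hb1v, hmeq]
            have : (((a + 1 : Nat)) : Int) = (a : Int) + 1 := by
              rw [Nat.cast_add, Nat.cast_one]
            rw [this]
            exact le_max_right _ _
          exact le_trans hle1 hb1_le_b2
        · -- suffix candidate: m = p.length - (a + 1)
          have hmeq : m = p.length - (a + 1) := hcase.2 hside
          have hpal : PalIdx p (p.length - 2 * (a + 1)) (2 * (a + 1)) :=
            (suffix_refl p (a + 1) hk1 hkn).mpr (hmeq ▸ hm)
          have hb2v : b2 = max b1 ((p.length : Int) - ((a : Int) + 1)) := by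
            rw [hb2def, if_pos (by rw [hgetS]; exact decide_eq_true hpal)]
          rw [hb2v, hmeq]
          have : ((p.length - (a + 1) : Nat) : Int) = (p.length : Int) - ((a : Int) + 1) := by
            rw [Nat.cast_sub hA2', Nat.cast_add, Nat.cast_one]
          rw [this]
          exact le_max_right _ _
    have h02 : 0 ≤ b2 := le_trans (le_trans h0 hbest_le_b1) hb1_le_b2
    have := ih (a + 1) b2 (by omega) hs2 h02 hc2
    rw [show (((a + 1 : Nat)) : Int) + 1 = ((a : Int) + 1) + 1 by rw [Nat.cast_add, Nat.cast_one]] at this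
    exact this

lemma revsymB_eq (p : List Int) : rev_sym_alt p = bestUpTo p (p.length - 1) := by
  unfold rev_sym_alt
  have hfd : PySem.Int.floordiv (p.length : Int) 2 = ((p.length / 2 : Nat) : Int) := by
    exact_mod_cast PySem.Int.floordiv_natCast p.length 2
  rw [hfd, ← rowOf_zero p]
  have := loopB_invariant p (p.length / 2) 0 0 (by omega) (Or.inl rfl) le_rfl
    (by
      intro m h1 h2 hm hmin
      omega)
  rw [show ((0 : Nat) : Int) + 1 = (1 : Int) by norm_num,
    show 2 * 0 = 0 from rfl] at this
  exact this

-- ===== VERDICT =====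
theorem rev_sym_spec : Claim_equal_rev_sym := by
  intro p _
  unfold Spec_rev_sym
  rw [revsymA_eq, revsymB_eq]
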